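-- pv_equiv track=rewrite | github.com/TrezeguetSanteb/TDA | Tercera Parte/VDecision.py | es_batalla_navala
-- ===== SOURCE A (Python) =====
-- def es_batalla_navala(rec_fil, rec_col, matriz):
--     cont = 0
--     i=0
--     j=0
--     rec_col_finales = [0]*len(rec_col)
--
--     for fila in matriz:
--         for celda in fila:
--             if celda == 1:
--                 rec_col_finales[j] += 1
--                 cont += 1
--             j += 1
--
--         if cont <= rec_fil[i]:
--             return False
--
--         i += 1
--         cont=0
--         j=0
--
--     for i in range(len(rec_col)):
--         if rec_col[i] < rec_col_finales[i]:
--             return False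
--
--     return True
-- ===== SOURCE B (Python) =====
-- def es_batalla_navala(rec_fil, rec_col, matriz):
--     # row pass: each row's number of 1s must strictly exceed its constraint
--     for i, fila in enumerate(matriz):
--         if fila.count(1) <= rec_fil[i]:
--             return False
--     # column pass: column-major totals, compared against rec_col
--     for j, cap in enumerate(rec_col):
--         if sum(1 for fila in matriz if j < len(fila) and fila[j] == 1) > cap:
--             return False
--     return True
-- ===== Notes on version B (the rewrite author's own statement) =====
-- stated objective: simpler
-- what changed: Replaces A's single interleaved pass with mutable counters (per-cell column accumulator array updated while scanning rows) by two independent shaped passes: a row pass using fila.count(1), then a column-major pass that recomputes each column total directly, with no mutable accumulator state.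
import Mathlib
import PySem

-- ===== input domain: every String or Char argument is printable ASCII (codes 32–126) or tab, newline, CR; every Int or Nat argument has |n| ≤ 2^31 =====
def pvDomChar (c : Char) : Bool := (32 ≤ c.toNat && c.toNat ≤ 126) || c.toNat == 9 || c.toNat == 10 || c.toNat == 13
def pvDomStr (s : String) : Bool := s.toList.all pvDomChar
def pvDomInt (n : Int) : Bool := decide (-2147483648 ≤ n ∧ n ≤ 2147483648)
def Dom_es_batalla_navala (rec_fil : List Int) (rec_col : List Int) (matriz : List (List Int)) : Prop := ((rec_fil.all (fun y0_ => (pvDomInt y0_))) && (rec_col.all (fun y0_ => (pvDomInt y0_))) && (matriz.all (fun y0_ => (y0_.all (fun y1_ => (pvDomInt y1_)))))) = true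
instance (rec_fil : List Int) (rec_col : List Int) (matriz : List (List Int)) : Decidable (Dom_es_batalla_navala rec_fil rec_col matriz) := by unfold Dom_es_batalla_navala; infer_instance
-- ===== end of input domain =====

-- B replaces A's single interleaved pass with mutable counters by two independent
-- shaped passes (a row pass via count, then a column-major recount); same cost, simpler.

-- ===== PORT A =====
-- inner 'for celda in fila' loop: state (cont, j, rec_col_finales)
def pvA_row (fila : List Int) (cont : Int) (j : Nat) (fin : List Int) : Int × List Int :=
  match fila with
  | [] => (cont, fin)
  | c :: rest =>
    if c = 1 then pvA_row rest (cont + 1) (j + 1) (fin.set j (fin.getD j 0 + 1))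
    else pvA_row rest cont (j + 1) fin

-- outer 'for fila in matriz' loop; rec_fil.getD i 0: in-range under Pre_ (Python raises out of range)
def pvA_loop (rec_fil : List Int) (rows : List (List Int)) (i : Nat) (fin : List Int) : Bool × List Int :=
  match rows with
  | [] => (true, fin)
  | fila :: rest =>
    let r := pvA_row fila 0 0 fin
    if r.1 ≤ rec_fil.getD i 0 then (false, r.2)
    else pvA_loop rec_fil rest (i + 1) r.2

-- final 'for i in range(len(rec_col))' loop
def pvA_cols (rec_col : List Int) (fin : List Int) (i : Nat) : Bool :=
  if _h : i < rec_col.length then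
    if rec_col.getD i 0 < fin.getD i 0 then false
    else pvA_cols rec_col fin (i + 1)
  else true
termination_by rec_col.length - i

def es_batalla_navala (rec_fil : List Int) (rec_col : List Int) (matriz : List (List Int)) : Bool :=
  let r := pvA_loop rec_fil matriz 0 (List.replicate rec_col.length 0)
  if r.1 then pvA_cols rec_col r.2 0 else false

-- ===== PORT B =====
-- 'for i, fila in enumerate(matriz): if fila.count(1) <= rec_fil[i]: return False'
def pvB_rowsCheck (rec_fil : List Int) (rows : List (List Int)) (i : Nat) : Bool :=
  match rows with
  | [] => true
  | fila :: rest =>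
    if PySem.List.count fila 1 ≤ rec_fil.getD i 0 then false
    else pvB_rowsCheck rec_fil rest (i + 1)

-- 'sum(1 for fila in matriz if j < len(fila) and fila[j] == 1)'
def pvB_colCount (matriz : List (List Int)) (j : Nat) : Int :=
  matriz.foldl (fun acc fila => if j < fila.length ∧ fila.getD j 0 = 1 then acc + 1 else acc) 0

-- 'for j, cap in enumerate(rec_col): if <column total> > cap: return False'
def pvB_colsCheck (rec_col : List Int) (matriz : List (List Int)) (j : Nat) : Bool :=
  match rec_col with
  | [] => true
  | cap :: rest =>
    if pvB_colCount matriz j > cap then false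
    else pvB_colsCheck rest matriz (j + 1)

def es_batalla_navala_alt (rec_fil : List Int) (rec_col : List Int) (matriz : List (List Int)) : Bool :=
  if pvB_rowsCheck rec_fil matriz 0 then pvB_colsCheck rec_col matriz 0 else false

-- ===== PRECONDITION & SPEC =====
-- Pre_ admits exactly the inputs on which A returns: it excludes only the inputs where A
-- raises IndexError — a reached row holding a 1 at a column index ≥ len(rec_col), or a
-- reached row index ≥ len(rec_fil) ("reached" = every earlier row's count of 1s strictly
-- exceeded its rec_fil entry, i.e. no earlier early return).
def Pre_es_batalla_navala (rec_fil : List Int) (rec_col : List Int) (matriz : List (List Int)) : Prop :=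
  ∀ i, i < matriz.length →
    (∀ i', i' < i → rec_fil.getD i' 0 < PySem.List.count (matriz.getD i' []) 1) →
    ((∀ j, j < (matriz.getD i []).length → (matriz.getD i []).getD j 0 = 1 → j < rec_col.length)
      ∧ i < rec_fil.length)
instance (rec_fil : List Int) (rec_col : List Int) (matriz : List (List Int)) : Decidable (Pre_es_batalla_navala rec_fil rec_col matriz) := by unfold Pre_es_batalla_navala; infer_instance

def pvWitness_es_batalla_navala : List Int × List Int × List (List Int) := ([0], [1], [[1]])

def Spec_es_batalla_navala (rec_fil : List Int) (rec_col : List Int) (matriz : List (List Int)) (out : Bool) : Prop := out = es_batalla_navala_alt rec_fil rec_col matriz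
instance (rec_fil : List Int) (rec_col : List Int) (matriz : List (List Int)) (out : Bool) : Decidable (Spec_es_batalla_navala rec_fil rec_col matriz out) := by unfold Spec_es_batalla_navala; infer_instance

-- ===== CLAIM (what is proved, stated in full; the proofs are below) =====
def Claim_equal_es_batalla_navala : Prop := ∀ (rec_fil : List Int) (rec_col : List Int) (matriz : List (List Int)), Dom_es_batalla_navala rec_fil rec_col matriz → Pre_es_batalla_navala rec_fil rec_col matriz → Spec_es_batalla_navala rec_fil rec_col matriz (es_batalla_navala rec_fil rec_col matriz)

-- ===== LEMMAS AND PROOFS =====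

-- A's inner loop accumulates the count of 1s of the row into cont
theorem pvA_row_fst (fila : List Int) (cont : Int) (j : Nat) (fin : List Int) :
    (pvA_row fila cont j fin).1 = cont + PySem.List.count fila 1 := by
  induction fila generalizing cont j fin with
  | nil => simp [pvA_row, PySem.List.count]
  | cons c rest ih =>
    by_cases hc : c = 1 <;>
      simp [pvA_row, hc, ih, PySem.List.count, List.count_cons] <;> ring

theorem pvA_row_len (fila : List Int) (cont : Int) (j : Nat) (fin : List Int) :
    (pvA_row fila cont j fin).2.length = fin.length := by
  induction fila generalizing cont j fin with
  | nil => simp [pvA_row]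
  | cons c rest ih =>
    by_cases hc : c = 1 <;> simp [pvA_row, hc, ih]

-- pointwise effect of A's inner loop on rec_col_finales
theorem pvA_row_getD (fila : List Int) (cont : Int) (j : Nat) (fin : List Int) (k : Nat)
    (hs : ∀ t, t < fila.length → fila.getD t 0 = 1 → j + t < fin.length) :
    (pvA_row fila cont j fin).2.getD k 0
      = fin.getD k 0 + (if j ≤ k ∧ k - j < fila.length ∧ fila.getD (k - j) 0 = 1 then 1 else 0) := by
  induction fila generalizing cont j fin with
  | nil => simp [pvA_row]
  | cons c rest ih =>
    by_cases hc : c = 1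
    · have hjlen : j < fin.length := by
        have := hs 0 (by simp) (by simpa [hc])
        omega
      rw [pvA_row, if_pos hc, ih]
      · have hlen' : (fin.set j (fin.getD j 0 + 1)).getD k 0
            = fin.getD k 0 + (if k = j then 1 else 0) := by
          by_cases hk : k = j
          · subst hk
            simp [List.getD_eq_getElem?_getD, List.getElem?_set_self, hjlen,
                  List.getElem?_eq_getElem, hjlen]
          · simp [List.getD_eq_getElem?_getD, List.getElem?_set_ne (by omega : j ≠ k), hk]
        rw [hlen']
        by_cases hk : k = j
        · subst hk
          simp [hc, Nat.sub_self]
        · by_cases hjk : j + 1 ≤ k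
          · have hkj : k - j = (k - (j + 1)) + 1 := by omega
            rw [hkj, List.getD_cons_succ]
            have : (j ≤ k ∧ k - (j+1) + 1 < (c :: rest).length ∧ rest.getD (k - (j+1)) 0 = 1)
                ↔ (j + 1 ≤ k ∧ k - (j + 1) < rest.length ∧ rest.getD (k - (j + 1)) 0 = 1) := by
              constructor <;> rintro ⟨h1, h2, h3⟩ <;> exact ⟨by omega, by simp at h2 ⊢; omega, h3⟩
            rw [if_congr this rfl rfl]
            omega
          · have h1 : ¬ (j + 1 ≤ k) := hjk
            have h2 : ¬ (j ≤ k) := by omega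
            simp [hk, h1, h2]
      · intro t ht h1
        have := hs (t + 1) (by simpa using ht) (by simpa using h1)
        simp only [List.length_set]
        omega
    · rw [pvA_row, if_neg hc, ih]
      · by_cases hk : k = j
        · subst hk
          have h0 : ¬ (k ≤ k ∧ k - k < (c :: rest).length ∧ (c :: rest).getD (k - k) 0 = 1) := by
            rintro ⟨-, -, h3⟩
            simp [Nat.sub_self] at h3
            exact hc h3
          simp [h0]
          omega
        · by_cases hjk : j + 1 ≤ k
          · have hkj : k - j = (k - (j + 1)) + 1 := by omega
            rw [hkj, List.getD_cons_succ]
            have : (j ≤ k ∧ k - (j+1) + 1 < (c :: rest).length ∧ rest.getD (k - (j+1)) 0 = 1)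
                ↔ (j + 1 ≤ k ∧ k - (j + 1) < rest.length ∧ rest.getD (k - (j + 1)) 0 = 1) := by
              constructor <;> rintro ⟨h1, h2, h3⟩ <;> exact ⟨by omega, by simp at h2 ⊢; omega, h3⟩
            rw [if_congr this rfl rfl]
          · have h1 : ¬ (j + 1 ≤ k) := hjk
            have h2 : ¬ (j ≤ k) := by omega
            simp [h1, h2]
      · intro t ht h1
        have := hs (t + 1) (by simpa using ht) (by simpa using h1)
        omega

-- A's outer loop returns early-False exactly where B's row pass does
theorem pvA_loop_fst (rec_fil : List Int) (rows : List (List Int)) (i : Nat) (fin : List Int) :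
    (pvA_loop rec_fil rows i fin).1 = pvB_rowsCheck rec_fil rows i := by
  induction rows generalizing i fin with
  | nil => simp [pvA_loop, pvB_rowsCheck]
  | cons fila rest ih =>
    simp only [pvA_loop, pvB_rowsCheck, pvA_row_fst, Int.zero_add]
    split_ifs <;> simp [ih]

theorem colCount_shift (rows : List (List Int)) (k : Nat) (a : Int) :
    rows.foldl (fun acc fila => if k < fila.length ∧ fila.getD k 0 = 1 then acc + 1 else acc) a
      = a + rows.foldl (fun acc fila => if k < fila.length ∧ fila.getD k 0 = 1 then acc + 1 else acc) 0 := by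
  induction rows generalizing a with
  | nil => simp
  | cons fila rest ih =>
    simp only [List.foldl_cons]
    rw [ih, ih (if k < fila.length ∧ fila.getD k 0 = 1 then (0:Int) + 1 else 0)]
    split_ifs <;> ring

theorem colCount_cons (fila : List Int) (rest : List (List Int)) (k : Nat) :
    pvB_colCount (fila :: rest) k
      = (if k < fila.length ∧ fila.getD k 0 = 1 then 1 else 0) + pvB_colCount rest k := by
  unfold pvB_colCount
  simp only [List.foldl_cons]
  rw [colCount_shift]
  split_ifs <;> ring

-- when no row returned early, rec_col_finales holds the column totals B recomputes
theorem pvA_loop_getD (rec_fil : List Int) (rows : List (List Int)) (i : Nat) (fin : List Int) (k : Nat)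
    (hs : ∀ fila ∈ rows, ∀ t, t < fila.length → fila.getD t 0 = 1 → t < fin.length)
    (hok : (pvA_loop rec_fil rows i fin).1 = true) :
    (pvA_loop rec_fil rows i fin).2.getD k 0 = fin.getD k 0 + pvB_colCount rows k := by
  induction rows generalizing i fin with
  | nil => simp [pvA_loop, pvB_colCount]
  | cons fila rest ih =>
    rw [pvA_loop] at hok ⊢
    split_ifs at hok ⊢ with h
    · rw [colCount_cons, ih]
      · rw [pvA_row_getD fila 0 0 fin k (by intro t ht h1; simpa using hs fila (by simp) t ht h1)]
        simp only [Nat.zero_le, true_and, Nat.sub_zero]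
        ring
      · intro fl hfl t ht h1
        rw [pvA_row_len]
        exact hs fl (by simp [hfl]) t ht h1
      · exact hok

-- B's row pass succeeding means every row strictly beats its rec_fil entry
theorem rowsCheck_counts (rec_fil : List Int) (rows : List (List Int)) (i0 : Nat)
    (h : pvB_rowsCheck rec_fil rows i0 = true) :
    ∀ t, t < rows.length → rec_fil.getD (i0 + t) 0 < PySem.List.count (rows.getD t []) 1 := by
  induction rows generalizing i0 with
  | nil => intro t ht; simp at ht
  | cons fila rest ih =>
    rw [pvB_rowsCheck] at h
    split_ifs at h with hcond
    intro t ht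
    match t with
    | 0 =>
      simp only [Nat.add_zero, List.getD_cons_zero]
      exact not_le.mp hcond
    | t' + 1 =>
      have := ih (i0 + 1) h t' (by simpa using ht)
      simpa [Nat.add_assoc, Nat.add_comm 1 t'] using this

-- A's final index loop agrees with B's structural column pass
theorem colsCheck_eq (rec_col : List Int) (fin : List Int) (m : List (List Int))
    (hfin : ∀ k, fin.getD k 0 = pvB_colCount m k) :
    ∀ i, pvA_cols rec_col fin i = pvB_colsCheck (rec_col.drop i) m i := by
  intro i
  induction hn : rec_col.length - i using Nat.strong_induction_on generalizing i with
  | _ n ihn =>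
    rw [pvA_cols]
    by_cases h1 : i < rec_col.length
    · rw [dif_pos h1, List.drop_eq_getElem_cons h1, pvB_colsCheck]
      have hgd : rec_col.getD i 0 = rec_col[i] := List.getD_eq_getElem rec_col 0 h1
      rw [hfin i, hgd]
      simp only [gt_iff_lt]
      split_ifs with h2
      · rfl
      · exact ihn (rec_col.length - (i + 1)) (by omega) (i + 1) rfl
    · rw [dif_neg h1, List.drop_eq_nil_of_le (by omega), pvB_colsCheck]

-- ===== VERDICT (by name: the statement is the Claim_ definition above) =====
theorem es_batalla_navala_spec : Claim_equal_es_batalla_navala := by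
  intro rec_fil rec_col matriz _hdom hpre
  unfold Spec_es_batalla_navala es_batalla_navala es_batalla_navala_alt
  simp only [pvA_loop_fst]
  by_cases hb : pvB_rowsCheck rec_fil matriz 0 = true
  · rw [hb]
    simp only [if_pos rfl]
    have hcnt := rowsCheck_counts rec_fil matriz 0 hb
    have hsafe : ∀ fila ∈ matriz, ∀ t, t < fila.length → fila.getD t 0 = 1 →
        t < (List.replicate rec_col.length (0 : Int)).length := by
      intro fila hfl t ht h1
      obtain ⟨i, hi, rfl⟩ := List.getElem_of_mem hfl
      have hget : matriz.getD i [] = matriz[i] := List.getD_eq_getElem matriz [] hi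
      have := (hpre i hi (by intro i' hi'; simpa using hcnt i' (by omega))).1
      rw [hget] at this
      simpa using this t ht h1
    have hloop : (pvA_loop rec_fil matriz 0 (List.replicate rec_col.length 0)).1 = true := by
      rw [pvA_loop_fst]; exact hb
    have hfin : ∀ k, (pvA_loop rec_fil matriz 0 (List.replicate rec_col.length 0)).2.getD k 0
        = pvB_colCount matriz k := by
      intro k
      rw [pvA_loop_getD rec_fil matriz 0 _ k hsafe hloop]
      have : (List.replicate rec_col.length (0 : Int)).getD k 0 = 0 := by
        by_cases hk : k < rec_col.length
        · simp [List.getD_eq_getElem?_getD, List.getElem?_replicate, hk]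
        · simp [List.getD_eq_getElem?_getD, List.getElem?_replicate, hk]
      rw [this, Int.zero_add]
    have := colsCheck_eq rec_col _ matriz hfin 0
    simpa using this
  · simp at hb
    rw [hb]
    simp
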